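-- pv_equiv track=rewrite | github.com/mohammadfaiizan/ProjectI | DSA/Theory/Dynamic_Programming/004_dp_knapsack_unbounded.py | coin_change_with_limits
-- ===== SOURCE A (Python) =====
-- from typing import List, Dict, Tuple, Optional
--
-- def coin_change_with_limits(coins: List[int], limits: List[int],
--                            amount: int) -> int:
--     """
--     Coin change where each coin type has a usage limit
--
--     Args:
--         coins: Available coin denominations
--         limits: limits[i] is max count for coins[i]
--         amount: Target amount to make
--
--     Returns:
--         Minimum coins needed, -1 if impossible
--     """
--     dp = [float('inf')] * (amount + 1)
--     dp[0] = 0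
--
--     for i in range(len(coins)):
--         coin = coins[i]
--         limit = limits[i]
--
--         # Use multiple knapsack approach
--         for j in range(amount, -1, -1):
--             if dp[j] == float('inf'):
--                 continue
--
--             for k in range(1, limit + 1):
--                 if j + k * coin <= amount:
--                     dp[j + k * coin] = min(dp[j + k * coin], dp[j] + k)
--
--     return dp[amount] if dp[amount] != float('inf') else -1
-- ===== SOURCE B (Python) =====
-- def coin_change_with_limits(coins, limits, amount):
--     """
--     Coin change where each coin type has a usage limit.
--
--     Bounded knapsack via binary decomposition: each (coin, limit) pair is
--     split into O(log limit) composite items (weight p*coin, cost p) whose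
--     subsets realise every count 0..limit; then a 0/1 knapsack pass per item.
--     """
--     INF = float('inf')
--     dp = [INF] * (amount + 1)
--     dp[0] = 0
--     items = []
--     for coin, limit in zip(coins, limits):
--         if coin <= 0 or limit <= 0:
--             continue
--         limit = min(limit, amount // coin)
--         k = 1
--         while limit > 0:
--             p = min(k, limit)
--             items.append((p * coin, p))
--             limit -= p
--             k *= 2
--     for w, c in items:
--         for j in range(amount, -1, -1):
--             if j + w <= amount:
--                 dp[j + w] = min(dp[j + w], dp[j] + c)
--     return dp[amount] if dp[amount] != INF else -1
-- ===== Notes on version B (the rewrite author's own statement) =====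
-- stated objective: faster
-- what changed: A scans every usage count k=1..limit per reachable dp state for each coin; B binary-decomposes each (coin, limit) pair (with limit capped at amount//coin) into O(log limit) composite 0/1 items and runs one backward 0/1-knapsack pass per item.
-- outside the precondition, e.g. on coin_change_with_limits([-1], [1], 1): A returns 1, B returns -1
import Mathlib
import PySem

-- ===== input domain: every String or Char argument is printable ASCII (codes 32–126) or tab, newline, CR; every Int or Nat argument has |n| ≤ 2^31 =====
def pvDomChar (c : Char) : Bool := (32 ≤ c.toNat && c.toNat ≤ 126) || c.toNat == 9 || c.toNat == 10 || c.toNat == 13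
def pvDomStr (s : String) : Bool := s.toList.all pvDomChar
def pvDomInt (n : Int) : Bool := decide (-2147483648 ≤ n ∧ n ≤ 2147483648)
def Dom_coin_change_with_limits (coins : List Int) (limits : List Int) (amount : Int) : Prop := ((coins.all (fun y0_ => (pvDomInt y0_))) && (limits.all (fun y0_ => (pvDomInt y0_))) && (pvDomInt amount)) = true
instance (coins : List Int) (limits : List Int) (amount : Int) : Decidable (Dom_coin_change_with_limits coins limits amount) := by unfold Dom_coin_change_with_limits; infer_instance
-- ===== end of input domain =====

-- B replaces A's per-coin loop over every usage count k ≤ limit by a binary decomposition of each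
-- (coin, limit) pair into O(log limit) composite 0/1 items (objective: faster).
-- dp cells hold `Option Int`: `none` is Python's float('inf').

-- shared primitive helpers (Python's min/+/assignment on possibly-infinite dp cells)
def pvVmin : Option Int → Option Int → Option Int
  | none, b => b
  | some a, none => some a
  | some a, some b => some (min a b)

def pvVadd (o : Option Int) (k : Int) : Option Int := o.map (· + k)

def pvGetL (dp : List (Option Int)) (i : Int) : Option Int := dp.getD i.toNat none

def pvSetL (dp : List (Option Int)) (i : Int) (v : Option Int) : List (Option Int) :=
  dp.set i.toNat v

-- ===== PORT A =====
def coin_change_with_limits (coins : List Int) (limits : List Int) (amount : Int) : Int :=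
  let dp0 := (List.replicate (amount + 1).toNat none).set 0 (some (0 : Int))
  let dp := (List.range coins.length).foldl (fun dp i =>
    let coin := coins.getD i 0
    let limit := limits.getD i 0
    (PySem.List.pyRange amount (-1) (-1)).foldl (fun dp j =>
      match pvGetL dp j with
      | none => dp
      | some _ =>
        (PySem.List.pyRange 1 (limit + 1) 1).foldl (fun dp k =>
          if j + k * coin ≤ amount then
            pvSetL dp (j + k * coin)
              (pvVmin (pvGetL dp (j + k * coin)) (pvVadd (pvGetL dp j) k))
          else dp) dp) dp) dp0
  match pvGetL dp amount with
  | none => -1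
  | some v => v

-- ===== PORT B =====
-- the while-loop of Source B's binary decomposition; fuel = initial limit.toNat bounds its iterations
def pvDecomp (coin : Int) : Nat → Int → Int → List (Int × Int)
  | 0, _, _ => []
  | fuel + 1, k, limit =>
    if 0 < limit then
      (min k limit * coin, min k limit) :: pvDecomp coin fuel (2 * k) (limit - min k limit)
    else []

def coin_change_with_limits_alt (coins : List Int) (limits : List Int) (amount : Int) : Int :=
  let items := (coins.zip limits).foldl (fun acc cl =>
    if cl.1 ≤ 0 ∨ cl.2 ≤ 0 then acc
    else
      let lim := min cl.2 (PySem.Int.floordiv amount cl.1)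
      acc ++ pvDecomp cl.1 lim.toNat 1 lim) []
  let dp0 := (List.replicate (amount + 1).toNat none).set 0 (some (0 : Int))
  let dp := items.foldl (fun dp wc =>
    (PySem.List.pyRange amount (-1) (-1)).foldl (fun dp j =>
      if j + wc.1 ≤ amount then
        pvSetL dp (j + wc.1) (pvVmin (pvGetL dp (j + wc.1)) (pvVadd (pvGetL dp j) wc.2))
      else dp) dp) dp0
  match pvGetL dp amount with
  | none => -1
  | some v => v

-- ===== PRECONDITION & SPEC =====
-- Pre_ excludes inputs where A raises (amount < 0: IndexError on dp[0]; limits shorter than coins: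
-- IndexError) and negative denominations, on which A's writes to dp[j + k*coin] go through Python's
-- negative-index wraparound (or raise IndexError), an accident of the list indexing.
def Pre_coin_change_with_limits (coins : List Int) (limits : List Int) (amount : Int) : Prop :=
  0 ≤ amount ∧ coins.length ≤ limits.length ∧ ∀ c ∈ coins, 0 ≤ c
instance (coins : List Int) (limits : List Int) (amount : Int) : Decidable (Pre_coin_change_with_limits coins limits amount) := by unfold Pre_coin_change_with_limits; infer_instance

def pvWitness_coin_change_with_limits : List Int × List Int × Int := ([1, 2], [5, 3], 7)

def Spec_coin_change_with_limits (coins : List Int) (limits : List Int) (amount : Int) (out : Int) : Prop := out = coin_change_with_limits_alt coins limits amount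
instance (coins : List Int) (limits : List Int) (amount : Int) (out : Int) : Decidable (Spec_coin_change_with_limits coins limits amount out) := by unfold Spec_coin_change_with_limits; infer_instance

-- ===== CLAIM (what is proved, stated in full; the proofs are below) =====
def Claim_equal_coin_change_with_limits : Prop := ∀ (coins : List Int) (limits : List Int) (amount : Int), Dom_coin_change_with_limits coins limits amount → Pre_coin_change_with_limits coins limits amount → Spec_coin_change_with_limits coins limits amount (coin_change_with_limits coins limits amount)

-- ===== LEMMAS AND PROOFS =====

theorem pvWitness_ok : Dom_coin_change_with_limits (pvWitness_coin_change_with_limits.1) (pvWitness_coin_change_with_limits.2.1) (pvWitness_coin_change_with_limits.2.2) ∧ Pre_coin_change_with_limits (pvWitness_coin_change_with_limits.1) (pvWitness_coin_change_with_limits.2.1) (pvWitness_coin_change_with_limits.2.2) := by decide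

-- function-state update used by the proof model
def pvUpd (d : Int → Option Int) (i : Int) (v : Option Int) : Int → Option Int :=
  fun x => if x = i then v else d x

-- ---- order on Option Int with none = +infinity, and min-fold toolkit ----
def pvVle : Option Int → Option Int → Prop
  | _, none => True
  | none, some _ => False
  | some a, some b => a ≤ b

def pvMfold (i : Option Int) (L : List (Option Int)) : Option Int := L.foldl pvVmin i

theorem pvVle_refl (a : Option Int) : pvVle a a := by cases a <;> simp [pvVle]

theorem pvVle_trans {a b c : Option Int} (h1 : pvVle a b) (h2 : pvVle b c) : pvVle a c := by
  cases a <;> cases b <;> cases c <;> simp_all [pvVle] <;> omega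

theorem pvVle_antisymm {a b : Option Int} (h1 : pvVle a b) (h2 : pvVle b a) : a = b := by
  cases a <;> cases b <;> simp_all [pvVle] <;> omega

theorem pvVle_none (a : Option Int) : pvVle a none := by cases a <;> simp [pvVle]

theorem pvVmin_le_left (a b : Option Int) : pvVle (pvVmin a b) a := by
  cases a <;> cases b <;> simp [pvVle, pvVmin]

theorem pvVmin_le_right (a b : Option Int) : pvVle (pvVmin a b) b := by
  cases a <;> cases b <;> simp [pvVle, pvVmin]

theorem pvLe_vmin {z a b : Option Int} (h1 : pvVle z a) (h2 : pvVle z b) : pvVle z (pvVmin a b) := by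
  cases z <;> cases a <;> cases b <;> simp_all [pvVle, pvVmin] <;> omega

theorem pvVmin_none_right (a : Option Int) : pvVmin a none = a := by cases a <;> rfl

theorem pvMfold_cons (i a : Option Int) (L : List (Option Int)) :
    pvMfold i (a :: L) = pvMfold (pvVmin i a) L := rfl

theorem pvMfold_append (i : Option Int) (L1 L2 : List (Option Int)) :
    pvMfold i (L1 ++ L2) = pvMfold (pvMfold i L1) L2 := List.foldl_append

theorem pvMfold_le_init (i : Option Int) (L : List (Option Int)) : pvVle (pvMfold i L) i := by
  induction L generalizing i with
  | nil => exact pvVle_refl i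
  | cons a L ih => exact pvVle_trans (ih (pvVmin i a)) (pvVmin_le_left i a)

theorem pvMfold_le_mem {y : Option Int} {L : List (Option Int)} (i : Option Int) (hy : y ∈ L) :
    pvVle (pvMfold i L) y := by
  induction L generalizing i with
  | nil => cases hy
  | cons a L ih =>
    rcases List.mem_cons.mp hy with h | h
    · subst h
      exact pvVle_trans (pvMfold_le_init (pvVmin i y) L) (pvVmin_le_right i y)
    · rw [pvMfold_cons]; exact ih (pvVmin i a) h

theorem pvLe_mfold {z i : Option Int} {L : List (Option Int)} (h0 : pvVle z i)
    (h : ∀ y ∈ L, pvVle z y) : pvVle z (pvMfold i L) := by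
  induction L generalizing i with
  | nil => exact h0
  | cons a L ih =>
    exact ih (pvLe_vmin h0 (h a List.mem_cons_self)) (fun y hy => h y (List.mem_cons_of_mem a hy))

theorem pvMfold_eq {i : Option Int} {L1 L2 : List (Option Int)}
    (h1 : ∀ y ∈ L1, pvVle (pvMfold i L2) y) (h2 : ∀ y ∈ L2, pvVle (pvMfold i L1) y) :
    pvMfold i L1 = pvMfold i L2 := by
  refine pvVle_antisymm ?_ ?_
  · exact pvLe_mfold (pvMfold_le_init i L1) h2
  · exact pvLe_mfold (pvMfold_le_init i L2) h1

theorem pvVadd_none (k : Int) : pvVadd none k = none := rfl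

theorem pvVadd_vmin (a b : Option Int) (k : Int) :
    pvVadd (pvVmin a b) k = pvVmin (pvVadd a k) (pvVadd b k) := by
  cases a <;> cases b <;> simp [pvVadd, pvVmin, min_add_add_right]

theorem pvVadd_vadd (o : Option Int) (a b : Int) : pvVadd (pvVadd o a) b = pvVadd o (a + b) := by
  cases o <;> simp [pvVadd] ; ring

theorem pvVmin_vadd_self (o : Option Int) (m : Int) (hm : 0 ≤ m) :
    pvVmin o (pvVadd o m) = o := by
  cases o with
  | none => rfl
  | some a => simp [pvVadd, pvVmin, min_eq_left, hm]

theorem pvUpd_self (d : Int → Option Int) (i : Int) : pvUpd d i (d i) = d := by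
  funext x
  simp only [pvUpd]
  split <;> simp_all

-- ---- candidate lists and the "pull" characterisation ----
def pvVal (d : Int → Option Int) (x : Int) (wc : Int × Int) : Option Int := pvVadd (d (x - wc.1)) wc.2

def pvCands (c l γ : Int) : List (Int × Int) :=
  (PySem.List.pyRange 1 (l + 1) 1).map (fun k => (k * c, k * γ))

def pvCmin (d : Int → Option Int) (L : List (Int × Int)) (x : Int) : Option Int :=
  pvMfold (d x) (L.map (pvVal d x))

def pvCminGt (d : Int → Option Int) (L : List (Int × Int)) (x J : Int) : Option Int :=
  pvMfold (d x) ((L.filter (fun wc => decide (J < x - wc.1))).map (pvVal d x))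

def pvInv (am : Int) (d : Int → Option Int) : Prop := ∀ x, x < 0 ∨ am < x → d x = none

theorem pvMem_cands {wc : Int × Int} {c l γ : Int} (h : wc ∈ pvCands c l γ) :
    ∃ k, 1 ≤ k ∧ k ≤ l ∧ wc = (k * c, k * γ) := by
  rcases List.mem_map.mp h with ⟨k, hk, rfl⟩
  rcases (PySem.List.mem_pyRange_one).mp hk with ⟨h1, h2⟩
  exact ⟨k, h1, by omega, rfl⟩

theorem pvCands_mem {k c l γ : Int} (h1 : 1 ≤ k) (h2 : k ≤ l) :
    (k * c, k * γ) ∈ pvCands c l γ := by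
  exact List.mem_map.mpr ⟨k, (PySem.List.mem_pyRange_one).mpr ⟨h1, by omega⟩, rfl⟩

-- the generic in-place backward pass (A's per-coin pass with cost k*γ; no skip on infinite cells)
def pvGpass (am c l γ : Int) (d : Int → Option Int) : Int → Option Int :=
  (PySem.List.pyRange am (-1) (-1)).foldl (fun dp j =>
    (PySem.List.pyRange 1 (l + 1) 1).foldl (fun dp k =>
      if j + k * c ≤ am then
        pvUpd dp (j + k * c) (pvVmin (dp (j + k * c)) (pvVadd (dp j) (k * γ)))
      else dp) dp) d

-- fold of guarded vmin-updates as an mfold over a filtered map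
theorem pvFoldl_if_to_mfold {α : Type} (P : α → Prop) [DecidablePred P] (f : α → Option Int) :
    ∀ (ks : List α) (i : Option Int),
      ks.foldl (fun acc k => if P k then pvVmin acc (f k) else acc) i
        = pvMfold i ((ks.filter (fun k => decide (P k))).map f) := by
  intro ks
  induction ks with
  | nil => intro i; rfl
  | cons a ks ih =>
    intro i
    by_cases h : P a <;> simp [List.foldl_cons, h, ih, List.filter_cons, pvMfold_cons]

theorem pvKfold_eq (am c γ j : Int) (hc : 1 ≤ c) :
    ∀ (ks : List Int), (∀ k ∈ ks, 1 ≤ k) → ∀ (s : Int → Option Int) (x : Int),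
      (ks.foldl (fun dp k =>
        if j + k * c ≤ am then
          pvUpd dp (j + k * c) (pvVmin (dp (j + k * c)) (pvVadd (dp j) (k * γ)))
        else dp) s) x
      = ks.foldl (fun acc k =>
          if j + k * c ≤ am ∧ j + k * c = x then pvVmin acc (pvVadd (s j) (k * γ)) else acc) (s x) := by
  intro ks
  induction ks with
  | nil => intro _ s x; rfl
  | cons a ks ih =>
    intro hmem s x
    have ha : 1 ≤ a := hmem a List.mem_cons_self
    have hac : 1 ≤ a * c := by nlinarith
    simp only [List.foldl_cons]
    set s1 : Int → Option Int :=
      (if j + a * c ≤ am then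
        pvUpd s (j + a * c) (pvVmin (s (j + a * c)) (pvVadd (s j) (a * γ)))
      else s) with hs1
    have hs1j : s1 j = s j := by
      rw [hs1]; split
      · simp only [pvUpd]; rw [if_neg (by omega)]
      · rfl
    have hs1x : s1 x = if j + a * c ≤ am ∧ j + a * c = x
        then pvVmin (s x) (pvVadd (s j) (a * γ)) else s x := by
      rw [hs1]
      by_cases h1 : j + a * c ≤ am
      · by_cases h2 : j + a * c = x
        · subst h2
          simp [pvUpd, h1]
        · simp [pvUpd, h1, h2, Ne.symm h2]
      · simp [h1]
    rw [ih (fun k hk => hmem k (List.mem_cons_of_mem a hk)) s1 x, hs1j, ← hs1x]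

theorem pvOuterStep (am c l γ J : Int) (d s : Int → Option Int) (hc : 1 ≤ c) (hJ0 : 0 ≤ J)
    (hJam : J ≤ am)
    (hs : ∀ x, s x = if x ≤ am then pvCminGt d (pvCands c l γ) x J else d x) :
    ∀ x, ((PySem.List.pyRange 1 (l + 1) 1).foldl (fun dp k =>
      if J + k * c ≤ am then
        pvUpd dp (J + k * c) (pvVmin (dp (J + k * c)) (pvVadd (dp J) (k * γ)))
      else dp) s) x = if x ≤ am then pvCminGt d (pvCands c l γ) x (J - 1) else d x := by
  intro x
  rw [pvKfold_eq am c γ J hc _ (fun k hk => ((PySem.List.mem_pyRange_one).mp hk).1) s x]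
  rw [pvFoldl_if_to_mfold (fun k => J + k * c ≤ am ∧ J + k * c = x)
    (fun k => pvVadd (s J) (k * γ))]
  have hsJ : s J = d J := by
    rw [hs J, if_pos hJam]
    unfold pvCminGt
    have hfilt : (pvCands c l γ).filter (fun wc => decide (J < J - wc.1)) = [] := by
      refine List.filter_eq_nil_iff.mpr (fun wc hwc => ?_)
      rcases pvMem_cands hwc with ⟨k, hk1, hk2, rfl⟩
      simp only [decide_eq_true_eq]
      nlinarith
    rw [hfilt]
    rfl
  rw [hsJ]
  by_cases hx : x ≤ am
  · rw [hs x, if_pos hx, if_pos hx]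
    unfold pvCminGt
    rw [← pvMfold_append]
    refine pvMfold_eq ?_ ?_
    · intro y hy
      rcases List.mem_append.mp hy with hy | hy
      · rcases List.mem_map.mp hy with ⟨wc, hwc, rfl⟩
        have h1 := (List.mem_filter.mp hwc).1
        have h2 := (List.mem_filter.mp hwc).2
        simp only [decide_eq_true_eq] at h2
        refine pvMfold_le_mem _ (List.mem_map.mpr ⟨wc, List.mem_filter.mpr ⟨h1, ?_⟩, rfl⟩)
        simp only [decide_eq_true_eq]; omega
      · rcases List.mem_map.mp hy with ⟨k, hk, rfl⟩
        have h1 := (List.mem_filter.mp hk).1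
        have h2 := (List.mem_filter.mp hk).2
        simp only [decide_eq_true_eq] at h2
        rcases (PySem.List.mem_pyRange_one).mp h1 with ⟨hk1, hk2⟩
        have hcand : ((k * c, k * γ) : Int × Int) ∈ pvCands c l γ := pvCands_mem hk1 (by omega)
        have hval : pvVal d x (k * c, k * γ) = pvVadd (d J) (k * γ) := by
          unfold pvVal
          have : x - (k * c, k * γ).1 = J := by simp; omega
          rw [this]
        refine pvVle_trans (pvMfold_le_mem _ (List.mem_map.mpr
          ⟨(k * c, k * γ), List.mem_filter.mpr ⟨hcand, ?_⟩, rfl⟩)) (by rw [hval]; exact pvVle_refl _)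
        simp only [decide_eq_true_eq]; omega
    · intro y hy
      rcases List.mem_map.mp hy with ⟨wc, hwc, rfl⟩
      have h1 := (List.mem_filter.mp hwc).1
      have h2 := (List.mem_filter.mp hwc).2
      simp only [decide_eq_true_eq] at h2
      rcases pvMem_cands h1 with ⟨k, hk1, hk2, rfl⟩
      simp only at h2
      by_cases hJlt : J < x - k * c
      · refine pvMfold_le_mem _ (List.mem_append.mpr (Or.inl (List.mem_map.mpr
          ⟨(k * c, k * γ), List.mem_filter.mpr ⟨h1, ?_⟩, rfl⟩)))
        simp only [decide_eq_true_eq]; exact hJlt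
      · have hxJ : x - k * c = J := by omega
        have hks : k ∈ PySem.List.pyRange 1 (l + 1) 1 :=
          (PySem.List.mem_pyRange_one).mpr ⟨hk1, by omega⟩
        have hval : pvVal d x (k * c, k * γ) = pvVadd (d J) (k * γ) := by
          unfold pvVal
          have : x - (k * c, k * γ).1 = J := by simpa using hxJ
          rw [this]
        rw [hval]
        refine pvMfold_le_mem _ (List.mem_append.mpr (Or.inr (List.mem_map.mpr
          ⟨k, List.mem_filter.mpr ⟨hks, ?_⟩, rfl⟩)))
        simp only [decide_eq_true_eq]
        omega
  · have hfilt2 : (PySem.List.pyRange 1 (l + 1) 1).filter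
        (fun k => decide (J + k * c ≤ am ∧ J + k * c = x)) = [] := by
      refine List.filter_eq_nil_iff.mpr (fun k hk => ?_)
      simp only [decide_eq_true_eq]
      rintro ⟨h1, h2⟩
      omega
    rw [hfilt2]
    rw [hs x, if_neg hx, if_neg hx]
    rfl

theorem pvGpassAux (am c l γ : Int) (d : Int → Option Int) (hc : 1 ≤ c) :
    ∀ (n : Nat) (s : Int → Option Int), (n : Int) ≤ am + 1 →
      (∀ x, s x = if x ≤ am then pvCminGt d (pvCands c l γ) x ((n : Int) - 1) else d x) →
      ∀ x, ((PySem.List.pyRange ((n : Int) - 1) (-1) (-1)).foldl (fun dp j =>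
        (PySem.List.pyRange 1 (l + 1) 1).foldl (fun dp k =>
          if j + k * c ≤ am then
            pvUpd dp (j + k * c) (pvVmin (dp (j + k * c)) (pvVadd (dp j) (k * γ)))
          else dp) dp) s) x
      = if x ≤ am then pvCminGt d (pvCands c l γ) x (-1) else d x := by
  intro n
  induction n with
  | zero =>
    intro s _ hs x
    rw [PySem.List.pyRange_neg_one_eq_nil (by norm_num)]
    simpa using hs x
  | succ n ih =>
    intro s hn hs x
    have hc1 : ((n + 1 : Nat) : Int) - 1 = (n : Int) := by push_cast; ring
    simp only [hc1] at hs ⊢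
    rw [PySem.List.pyRange_neg_one_cons (by omega : (-1 : Int) < (n : Int)), List.foldl_cons]
    have hstep := pvOuterStep am c l γ (n : Int) d s hc (by omega) (by omega) hs
    exact ih _ (by omega) hstep x

theorem pvMfold_all_none (i : Option Int) (L : List (Option Int)) (h : ∀ y ∈ L, y = none) :
    pvMfold i L = i := by
  induction L generalizing i with
  | nil => rfl
  | cons a L ih =>
    rw [pvMfold_cons, h a List.mem_cons_self, pvVmin_none_right]
    exact ih i (fun y hy => h y (List.mem_cons_of_mem a hy))

theorem pvGpass_eq (am c l γ : Int) (d : Int → Option Int) (hc : 1 ≤ c) (hinv : pvInv am d) :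
    ∀ x, pvGpass am c l γ d x = if x ≤ am then pvCmin d (pvCands c l γ) x else d x := by
  intro x
  unfold pvGpass
  by_cases ham : 0 ≤ am
  · have hn : ((am + 1).toNat : Int) = am + 1 := Int.toNat_of_nonneg (by omega)
    have hinit : ∀ x, d x = if x ≤ am
        then pvCminGt d (pvCands c l γ) x (((am + 1).toNat : Int) - 1) else d x := by
      intro x
      rw [hn, add_sub_cancel_right]
      by_cases hx : x ≤ am
      · rw [if_pos hx]
        unfold pvCminGt
        have hfilt : (pvCands c l γ).filter (fun wc => decide (am < x - wc.1)) = [] := by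
          refine List.filter_eq_nil_iff.mpr (fun wc hwc => ?_)
          rcases pvMem_cands hwc with ⟨k, hk1, hk2, rfl⟩
          simp only [decide_eq_true_eq]
          nlinarith
        rw [hfilt]
        rfl
      · rw [if_neg hx]
    have haux := pvGpassAux am c l γ d hc ((am + 1).toNat) d (by omega) hinit x
    rw [hn, add_sub_cancel_right] at haux
    rw [haux]
    by_cases hx : x ≤ am
    · rw [if_pos hx, if_pos hx]
      unfold pvCminGt pvCmin
      refine pvMfold_eq ?_ ?_
      · intro y hy
        rcases List.mem_map.mp hy with ⟨wc, hwc, rfl⟩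
        exact pvMfold_le_mem _ (List.mem_map.mpr ⟨wc, (List.mem_filter.mp hwc).1, rfl⟩)
      · intro y hy
        rcases List.mem_map.mp hy with ⟨wc, hwc, rfl⟩
        by_cases hgt : -1 < x - wc.1
        · refine pvMfold_le_mem _ (List.mem_map.mpr ⟨wc, List.mem_filter.mpr ⟨hwc, ?_⟩, rfl⟩)
          simp only [decide_eq_true_eq]; exact hgt
        · have : d (x - wc.1) = none := hinv _ (Or.inl (by omega))
          unfold pvVal
          rw [this, pvVadd_none]
          exact pvVle_none _
    · rw [if_neg hx, if_neg hx]
  · rw [PySem.List.pyRange_neg_one_eq_nil (by omega)]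
    simp only [List.foldl_nil]
    by_cases hx : x ≤ am
    · rw [if_pos hx]
      have hdx : d x = none := hinv _ (Or.inl (by omega))
      unfold pvCmin
      rw [hdx, pvMfold_all_none]
      intro y hy
      rcases List.mem_map.mp hy with ⟨wc, hwc, rfl⟩
      rcases pvMem_cands hwc with ⟨k, hk1, hk2, rfl⟩
      have : d (x - (k * c, k * γ).1) = none := by
        refine hinv _ (Or.inl ?_)
        simp only
        nlinarith
      unfold pvVal
      rw [this, pvVadd_none]
    · rw [if_neg hx]

theorem pvGpass_zero (am l γ : Int) (hγ : 0 ≤ γ) (d : Int → Option Int) :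
    pvGpass am 0 l γ d = d := by
  have hinner : ∀ (j : Int) (ks : List Int), (∀ k ∈ ks, 1 ≤ k) → ∀ dp : Int → Option Int,
      ks.foldl (fun dp k =>
        if j + k * 0 ≤ am then
          pvUpd dp (j + k * 0) (pvVmin (dp (j + k * 0)) (pvVadd (dp j) (k * γ)))
        else dp) dp = dp := by
    intro j ks
    induction ks with
    | nil => intro _ dp; rfl
    | cons a ks ih =>
      intro hmem dp
      have ha : 1 ≤ a := hmem a List.mem_cons_self
      rw [List.foldl_cons]
      have hstep : (if j + a * 0 ≤ am then
          pvUpd dp (j + a * 0) (pvVmin (dp (j + a * 0)) (pvVadd (dp j) (a * γ))) else dp) = dp := by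
        simp only [mul_zero, add_zero]
        split
        · rw [pvVmin_vadd_self _ _ (mul_nonneg (by omega) hγ), pvUpd_self]
        · rfl
      rw [hstep]
      exact ih (fun k hk => hmem k (List.mem_cons_of_mem a hk)) dp
  unfold pvGpass
  generalize PySem.List.pyRange am (-1) (-1) = js
  induction js generalizing d with
  | nil => rfl
  | cons a js ih =>
    rw [List.foldl_cons, hinner a _ (fun k hk => ((PySem.List.mem_pyRange_one).mp hk).1) d]
    exact ih d

theorem pvFoldl_id {α β : Type} (L : List α) (d : β) : L.foldl (fun dp _ => dp) d = d := by
  induction L <;> simp_all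

theorem pvGpass_nil_l (am c l γ : Int) (hl : l ≤ 0) (d : Int → Option Int) :
    pvGpass am c l γ d = d := by
  unfold pvGpass
  rw [PySem.List.pyRange_one_eq_nil (by omega)]
  exact pvFoldl_id _ d

theorem pvFoldl_ext {α β : Type} (f g : β → α → β) (h : ∀ b a, f b a = g b a) :
    ∀ (l : List α) (b : β), l.foldl f b = l.foldl g b := by
  intro l
  induction l with
  | nil => intro b; rfl
  | cons a l ih => intro b; rw [List.foldl_cons, List.foldl_cons, h b a]; exact ih _

-- ---- binary decomposition: parts, subset sums, coverage ----
def pvParts : Nat → Int → Int → List Int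
  | 0, _, _ => []
  | fuel + 1, k, limit =>
    if 0 < limit then min k limit :: pvParts fuel (2 * k) (limit - min k limit) else []

theorem pvDecomp_eq_parts (c : Int) :
    ∀ (fuel : Nat) (k limit : Int),
      pvDecomp c fuel k limit = (pvParts fuel k limit).map (fun p => (p * c, p)) := by
  intro fuel
  induction fuel with
  | zero => intro k limit; rfl
  | succ fuel ih =>
    intro k limit
    unfold pvDecomp pvParts
    split
    · rw [List.map_cons, ih]
    · rfl

theorem pvParts_pos : ∀ (fuel : Nat) (k limit : Int), 1 ≤ k → ∀ p ∈ pvParts fuel k limit, 1 ≤ p := by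
  intro fuel
  induction fuel with
  | zero => intro k limit _ p hp; cases hp
  | succ fuel ih =>
    intro k limit hk p hp
    unfold pvParts at hp
    split at hp
    · rcases List.mem_cons.mp hp with h | h
      · subst h; omega
      · exact ih (2 * k) _ (by omega) p h
    · cases hp

theorem pvParts_sum_le : ∀ (fuel : Nat) (k limit : Int), 1 ≤ k → 0 ≤ limit →
    (pvParts fuel k limit).sum ≤ limit := by
  intro fuel
  induction fuel with
  | zero => intro k limit _ h; simpa [pvParts] using h
  | succ fuel ih =>
    intro k limit hk hlim
    unfold pvParts
    split
    · rw [List.sum_cons]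
      have := ih (2 * k) (limit - min k limit) (by omega) (by omega)
      omega
    · simpa using hlim

def pvISums : List Int → List Int
  | [] => []
  | p :: L => p :: (pvISums L ++ (pvISums L).map (fun t => p + t))

def pvSums : List (Int × Int) → List (Int × Int)
  | [] => []
  | i :: L => i :: (pvSums L ++ (pvSums L).map (fun wc => (i.1 + wc.1, i.2 + wc.2)))

theorem pvSums_map (c : Int) : ∀ parts : List Int,
    pvSums (parts.map (fun p => (p * c, p))) = (pvISums parts).map (fun t => (t * c, t)) := by
  intro parts
  induction parts with
  | nil => rfl
  | cons p L ih =>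
    simp only [List.map_cons, pvSums, pvISums, ih, List.map_append, List.map_map]
    refine congrArg _ (congrArg _ (List.map_congr_left (fun t _ => ?_)))
    simp only [Function.comp_apply, Prod.mk.injEq]
    exact ⟨by ring, trivial⟩

theorem pvISums_mem_bounds : ∀ parts : List Int, (∀ p ∈ parts, 1 ≤ p) →
    ∀ t ∈ pvISums parts, 1 ≤ t ∧ t ≤ parts.sum := by
  intro parts
  induction parts with
  | nil => intro _ t ht; cases ht
  | cons p L ih =>
    intro hpos t ht
    have hp : 1 ≤ p := hpos p List.mem_cons_self
    have hL : ∀ q ∈ L, 1 ≤ q := fun q hq => hpos q (List.mem_cons_of_mem p hq)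
    have hsum : 0 ≤ L.sum := List.sum_nonneg (fun q hq => by have := hL q hq; omega)
    rw [List.sum_cons]
    rcases List.mem_cons.mp ht with h | h
    · omega
    · rcases List.mem_append.mp h with h | h
      · have := ih hL t h; omega
      · rcases List.mem_map.mp h with ⟨u, hu, rfl⟩
        have := ih hL u hu; omega

theorem pvCover : ∀ (fuel : Nat) (k lim s : Int), 1 ≤ k → lim.toNat ≤ fuel → 0 ≤ s →
    s ≤ lim + k - 1 →
    ∃ t, (t = 0 ∨ t ∈ pvISums (pvParts fuel k lim)) ∧ t ≤ s ∧ s ≤ t + k - 1 := by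
  intro fuel
  induction fuel with
  | zero =>
    intro k lim s hk hfuel hs0 hs1
    exact ⟨0, Or.inl rfl, hs0, by omega⟩
  | succ fuel ih =>
    intro k lim s hk hfuel hs0 hs1
    by_cases hlim : 0 < lim
    · unfold pvParts
      rw [if_pos hlim]
      rcases le_total k lim with hkl | hkl
      · -- p = k
        have hmin : min k lim = k := min_eq_left hkl
        rw [hmin]
        simp only [pvISums]
        rcases ih (2 * k) (lim - k) s (by omega) (by omega) hs0 (by omega) with ⟨t, hmem, ht1, ht2⟩
        by_cases hcase : s ≤ t + k - 1
        · refine ⟨t, ?_, ht1, hcase⟩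
          rcases hmem with h | h
          · exact Or.inl h
          · exact Or.inr (List.mem_cons_of_mem _ (List.mem_append.mpr (Or.inl h)))
        · refine ⟨t + k, ?_, by omega, by omega⟩
          rcases hmem with h | h
          · subst h
            rw [zero_add]
            exact Or.inr List.mem_cons_self
          · refine Or.inr (List.mem_cons_of_mem _ (List.mem_append.mpr (Or.inr ?_)))
            exact List.mem_map.mpr ⟨t, h, by ring⟩
      · -- p = lim, rest empty
        have hmin : min k lim = lim := min_eq_right hkl
        rw [hmin]
        simp only [pvISums]
        by_cases hcase : s ≤ k - 1
        · exact ⟨0, Or.inl rfl, hs0, by omega⟩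
        · refine ⟨lim, Or.inr ?_, by omega, by omega⟩
          exact List.mem_cons_self
    · exact ⟨0, Or.inl rfl, hs0, by omega⟩

theorem pvCands_one (w γ : Int) : pvCands w 1 γ = [(w, γ)] := by
  unfold pvCands
  rw [PySem.List.pyRange_one]
  norm_num

theorem pvSums_pos : ∀ items : List (Int × Int), (∀ wc ∈ items, 1 ≤ wc.1) →
    ∀ wc ∈ pvSums items, 1 ≤ wc.1 := by
  intro items
  induction items with
  | nil => intro _ wc h; cases h
  | cons i L ih =>
    intro hpos wc hwc
    have hi : 1 ≤ i.1 := hpos i List.mem_cons_self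
    have hL : ∀ w ∈ L, 1 ≤ w.1 := fun w hw => hpos w (List.mem_cons_of_mem i hw)
    rcases List.mem_cons.mp hwc with h | h
    · subst h; exact hi
    · rcases List.mem_append.mp h with h | h
      · exact ih hL wc h
      · rcases List.mem_map.mp h with ⟨u, hu, rfl⟩
        have := ih hL u hu
        simp only
        omega

theorem pvInv_cmin (am : Int) (ham : 0 ≤ am) (d : Int → Option Int) (hinv : pvInv am d)
    (L : List (Int × Int)) (hL : ∀ wc ∈ L, 1 ≤ wc.1) :
    pvInv am (fun x => if x ≤ am then pvCmin d L x else d x) := by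
  intro x hx
  rcases hx with hx | hx
  · show (if x ≤ am then pvCmin d L x else d x) = none
    rw [if_pos (by omega)]
    unfold pvCmin
    rw [hinv x (Or.inl hx), pvMfold_all_none]
    intro y hy
    rcases List.mem_map.mp hy with ⟨wc, hwc, rfl⟩
    have := hL wc hwc
    unfold pvVal
    rw [hinv _ (Or.inl (by omega)), pvVadd_none]
  · show (if x ≤ am then pvCmin d L x else d x) = none
    rw [if_neg (by omega)]
    exact hinv x (Or.inr hx)

theorem pvSeq_eq (am : Int) (ham : 0 ≤ am) : ∀ (items : List (Int × Int)),
    (∀ wc ∈ items, 1 ≤ wc.1) → ∀ d, pvInv am d →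
    (items.foldl (fun dp wc => pvGpass am wc.1 1 wc.2 dp) d)
      = fun x => if x ≤ am then pvCmin d (pvSums items) x else d x := by
  intro items
  induction items with
  | nil =>
    intro _ d _
    funext x
    simp [pvSums, pvCmin, pvMfold]
  | cons i L ih =>
    intro hw d hinv
    have hi1 : 1 ≤ i.1 := hw i List.mem_cons_self
    have hL : ∀ wc ∈ L, 1 ≤ wc.1 := fun wc h => hw wc (List.mem_cons_of_mem i h)
    have hS1 : ∀ wc ∈ pvSums L, 1 ≤ wc.1 := pvSums_pos L hL
    rw [List.foldl_cons]
    have hd1 : pvGpass am i.1 1 i.2 d = fun x => if x ≤ am then pvCmin d [i] x else d x := by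
      funext x
      rw [pvGpass_eq am i.1 1 i.2 d hi1 hinv x, pvCands_one]
    rw [hd1]
    have hinv1 : pvInv am (fun x => if x ≤ am then pvCmin d [i] x else d x) :=
      pvInv_cmin am ham d hinv [i] (fun wc hwc => by
        rw [List.mem_singleton.mp hwc]; exact hi1)
    rw [ih hL _ hinv1]
    set d1 : Int → Option Int := fun y => if y ≤ am then pvCmin d [i] y else d y with hd1def
    funext x
    by_cases hx : x ≤ am
    · rw [if_pos hx, if_pos hx]
      have hd1y : ∀ y : Int, y ≤ am → d1 y = pvVmin (d y) (pvVal d y i) := by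
        intro y hy
        rw [hd1def]
        simp only
        rw [if_pos hy]
        rfl
      have hval : ∀ wc ∈ pvSums L,
          pvVal d1 x wc = pvVmin (pvVal d x wc) (pvVal d x (i.1 + wc.1, i.2 + wc.2)) := by
        intro wc hwc
        have h1 : 1 ≤ wc.1 := hS1 wc hwc
        show pvVadd (d1 (x - wc.1)) wc.2 = _
        rw [hd1y (x - wc.1) (by omega), pvVadd_vmin]
        unfold pvVal
        rw [pvVadd_vadd]
        have h2 : x - wc.1 - i.1 = x - (i.1 + wc.1, i.2 + wc.2).1 := by simp only; ring
        rw [h2]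
      have hsplit : pvCmin d (pvSums (i :: L)) x
          = pvMfold (pvVmin (d x) (pvVal d x i))
              ((pvSums L ++ (pvSums L).map (fun wc => (i.1 + wc.1, i.2 + wc.2))).map
                (pvVal d x)) := by
        show pvMfold (d x) ((pvSums (i :: L)).map (pvVal d x)) = _
        simp only [pvSums, List.map_cons, pvMfold_cons]
      have hleft : pvCmin d1 (pvSums L) x
          = pvMfold (pvVmin (d x) (pvVal d x i)) ((pvSums L).map (pvVal d1 x)) := by
        show pvMfold (d1 x) ((pvSums L).map (pvVal d1 x)) = _
        rw [hd1y x hx]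
      rw [hleft, hsplit]
      refine pvMfold_eq ?_ ?_
      · intro y hy
        rcases List.mem_map.mp hy with ⟨wc, hwc, rfl⟩
        rw [hval wc hwc]
        refine pvLe_vmin ?_ ?_
        · exact pvMfold_le_mem _ (List.mem_map.mpr ⟨wc, List.mem_append.mpr (Or.inl hwc), rfl⟩)
        · refine pvMfold_le_mem _ (List.mem_map.mpr
            ⟨(i.1 + wc.1, i.2 + wc.2), List.mem_append.mpr (Or.inr ?_), rfl⟩)
          exact List.mem_map.mpr ⟨wc, hwc, rfl⟩
      · intro y hy
        rcases List.mem_map.mp hy with ⟨wc', hwc', rfl⟩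
        rcases List.mem_append.mp hwc' with h | h
        · refine pvVle_trans (pvMfold_le_mem _ (List.mem_map.mpr ⟨wc', h, rfl⟩)) ?_
          rw [hval wc' h]
          exact pvVmin_le_left _ _
        · rcases List.mem_map.mp h with ⟨wc, hwc, rfl⟩
          refine pvVle_trans (pvMfold_le_mem _ (List.mem_map.mpr ⟨wc, hwc, rfl⟩)) ?_
          rw [hval wc hwc]
          exact pvVmin_le_right _ _
    · simp only [if_neg hx]

theorem pvGroup_cmin (am c l : Int) (hc : 1 ≤ c) (hl : 1 ≤ l) (ham : 0 ≤ am)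
    (d : Int → Option Int) (hinv : pvInv am d) (x : Int) (hx : x ≤ am) :
    pvCmin d (pvSums (pvDecomp c (min l (PySem.Int.floordiv am c)).toNat 1
      (min l (PySem.Int.floordiv am c)))) x = pvCmin d (pvCands c l 1) x := by
  have hfd0 : 0 ≤ PySem.Int.floordiv am c := by
    rw [PySem.Int.floordiv_eq_ediv_of_pos (by omega)]
    exact Int.ediv_nonneg ham (by omega)
  have hfdlt : ∀ k : Int, PySem.Int.floordiv am c < k → am < k * c := by
    intro k hk
    have hmod := PySem.Int.floordiv_mul_add_mod am c
    have hm0 : 0 ≤ PySem.Int.mod am c := by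
      rw [PySem.Int.mod_eq_emod_of_pos (by omega)]
      exact Int.emod_nonneg am (by omega)
    have hm1 : PySem.Int.mod am c < c := by
      rw [PySem.Int.mod_eq_emod_of_pos (by omega)]
      exact Int.emod_lt_of_pos am (by omega)
    nlinarith
  have hlim0 : 0 ≤ min l (PySem.Int.floordiv am c) := le_min (by omega) hfd0
  rw [pvDecomp_eq_parts, pvSums_map]
  have hpos := pvParts_pos (min l (PySem.Int.floordiv am c)).toNat 1
    (min l (PySem.Int.floordiv am c)) le_rfl
  have hsum := pvParts_sum_le (min l (PySem.Int.floordiv am c)).toNat 1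
    (min l (PySem.Int.floordiv am c)) le_rfl hlim0
  unfold pvCmin
  refine pvMfold_eq ?_ ?_
  · intro y hy
    rcases List.mem_map.mp hy with ⟨wc, hwc, rfl⟩
    rcases List.mem_map.mp hwc with ⟨t, ht, rfl⟩
    have hb := pvISums_mem_bounds _ hpos t ht
    have hcand : ((t * c, t * 1) : Int × Int) ∈ pvCands c l 1 :=
      pvCands_mem hb.1 (by omega)
    refine pvVle_trans (pvMfold_le_mem _ (List.mem_map.mpr ⟨(t * c, t * 1), hcand, rfl⟩)) ?_
    rw [mul_one]
    exact pvVle_refl _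
  · intro y hy
    rcases List.mem_map.mp hy with ⟨wc, hwc, rfl⟩
    rcases pvMem_cands hwc with ⟨k, hk1, hk2, rfl⟩
    by_cases hk : k ≤ min l (PySem.Int.floordiv am c)
    · rcases pvCover (min l (PySem.Int.floordiv am c)).toNat 1
        (min l (PySem.Int.floordiv am c)) k le_rfl le_rfl (by omega) (by omega)
        with ⟨t, hmem, ht1, ht2⟩
      have htk : t = k := by omega
      subst htk
      have hmem' : t ∈ pvISums (pvParts (min l (PySem.Int.floordiv am c)).toNat 1
          (min l (PySem.Int.floordiv am c))) := by
        rcases hmem with h | h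
        · omega
        · exact h
      refine pvVle_trans (pvMfold_le_mem _ (List.mem_map.mpr
        ⟨(t * c, t), List.mem_map.mpr ⟨t, hmem', rfl⟩, rfl⟩)) ?_
      unfold pvVal
      simp only [mul_one]
      exact pvVle_refl _
    · have hamlt : am < k * c := hfdlt k (by omega)
      have : d (x - (k * c, k * 1).1) = none := hinv _ (Or.inl (by simp only; omega))
      unfold pvVal
      rw [this, pvVadd_none]
      exact pvVle_none _

-- ---- bridges from the ports' loop bodies to pvGpass ----
theorem pvInnerNone (am c γ j : Int) (d : Int → Option Int) (hdj : d j = none) :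
    ∀ ks : List Int, ks.foldl (fun dp k =>
      if j + k * c ≤ am then
        pvUpd dp (j + k * c) (pvVmin (dp (j + k * c)) (pvVadd (dp j) (k * γ)))
      else dp) d = d := by
  intro ks
  induction ks with
  | nil => rfl
  | cons a ks ih =>
    rw [List.foldl_cons]
    have hstep : (if j + a * c ≤ am then
        pvUpd d (j + a * c) (pvVmin (d (j + a * c)) (pvVadd (d j) (a * γ))) else d) = d := by
      split
      · rw [hdj, pvVadd_none, pvVmin_none_right, pvUpd_self]
      · rfl
    rw [hstep]
    exact ih

theorem pvApass_eq_gpass (am c l : Int) (d : Int → Option Int) :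
    (PySem.List.pyRange am (-1) (-1)).foldl (fun dp j =>
      match dp j with
      | none => dp
      | some _ => (PySem.List.pyRange 1 (l + 1) 1).foldl (fun dp k =>
          if j + k * c ≤ am then
            pvUpd dp (j + k * c) (pvVmin (dp (j + k * c)) (pvVadd (dp j) k))
          else dp) dp) d
    = pvGpass am c l 1 d := by
  unfold pvGpass
  refine pvFoldl_ext _ _ (fun dp j => ?_) _ d
  cases h : dp j with
  | none =>
    simp only [h]
    exact (pvInnerNone am c 1 j dp h _).symm
  | some v =>
    simp only [h, mul_one]

theorem pvBpass_eq_gpass (am w γ : Int) (d : Int → Option Int) :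
    (PySem.List.pyRange am (-1) (-1)).foldl (fun dp j =>
      if j + w ≤ am then pvUpd dp (j + w) (pvVmin (dp (j + w)) (pvVadd (dp j) γ)) else dp) d
    = pvGpass am w 1 γ d := by
  unfold pvGpass
  refine pvFoldl_ext _ _ (fun dp j => ?_) _ d
  have h12 : PySem.List.pyRange 1 (1 + 1) 1 = [1] := by
    rw [PySem.List.pyRange_one]
    norm_num
  rw [h12]
  simp only [List.foldl_cons, List.foldl_nil, one_mul]

theorem pvFoldl_flatMap {α β γ : Type} (g : α → List β) (f : γ → β → γ) :
    ∀ (L : List α) (i : γ),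
      (L.flatMap g).foldl f i = L.foldl (fun s a => (g a).foldl f s) i := by
  intro L
  induction L with
  | nil => intro i; rfl
  | cons a L ih => intro i; rw [List.flatMap_cons, List.foldl_append, List.foldl_cons, ih]

theorem pvItems_eq (am : Int) :
    ∀ (pairs : List (Int × Int)) (acc : List (Int × Int)),
      pairs.foldl (fun acc cl =>
        if cl.1 ≤ 0 ∨ cl.2 ≤ 0 then acc
        else acc ++ pvDecomp cl.1 (min cl.2 (PySem.Int.floordiv am cl.1)).toNat 1
          (min cl.2 (PySem.Int.floordiv am cl.1))) acc
      = acc ++ pairs.flatMap (fun cl =>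
          if cl.1 ≤ 0 ∨ cl.2 ≤ 0 then []
          else pvDecomp cl.1 (min cl.2 (PySem.Int.floordiv am cl.1)).toNat 1
            (min cl.2 (PySem.Int.floordiv am cl.1))) := by
  intro pairs
  induction pairs with
  | nil => intro acc; simp
  | cons p ps ih =>
    intro acc
    rw [List.foldl_cons, List.flatMap_cons]
    by_cases hg : p.1 ≤ 0 ∨ p.2 ≤ 0
    · rw [if_pos hg, if_pos hg, ih]
      simp
    · rw [if_neg hg, if_neg hg, ih, List.append_assoc]

theorem pvZip_eq (coins limits : List Int) (h : coins.length ≤ limits.length) :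
    (List.range coins.length).map (fun i => (coins.getD i 0, limits.getD i 0))
      = coins.zip limits := by
  refine List.ext_getElem ?_ ?_
  · simp only [List.length_map, List.length_range, List.length_zip]
    omega
  · intro n h1 h2
    have hn : n < coins.length := by simpa using h1
    simp only [List.getElem_map, List.getElem_range, List.getElem_zip, List.getD_eq_getElem?_getD,
      List.getElem?_eq_getElem hn, List.getElem?_eq_getElem (lt_of_lt_of_le hn h), Option.getD_some]

-- ---- per-coin equality and the chain over all coins ----
theorem pvPairEq (am c l : Int) (ham : 0 ≤ am) (hc0 : 0 ≤ c) (d : Int → Option Int)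
    (hinv : pvInv am d) :
    (pvGpass am c l 1 d
      = (if c ≤ 0 ∨ l ≤ 0 then ([] : List (Int × Int)) else
          pvDecomp c (min l (PySem.Int.floordiv am c)).toNat 1
            (min l (PySem.Int.floordiv am c))).foldl
          (fun dp wc => pvGpass am wc.1 1 wc.2 dp) d)
    ∧ pvInv am (pvGpass am c l 1 d) := by
  by_cases hc : c = 0
  · subst hc
    rw [pvGpass_zero am l 1 (by norm_num) d, if_pos (Or.inl le_rfl)]
    exact ⟨rfl, hinv⟩
  · by_cases hl : l ≤ 0
    · rw [pvGpass_nil_l am c l 1 hl d, if_pos (Or.inr hl)]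
      exact ⟨rfl, hinv⟩
    · have hc1 : 1 ≤ c := by omega
      have hl1 : 1 ≤ l := by omega
      have hA : pvGpass am c l 1 d
          = fun x => if x ≤ am then pvCmin d (pvCands c l 1) x else d x :=
        funext (pvGpass_eq am c l 1 d hc1 hinv)
      have hcand1 : ∀ wc ∈ pvCands c l 1, 1 ≤ wc.1 := by
        intro wc hwc
        rcases pvMem_cands hwc with ⟨k, hk1, hk2, rfl⟩
        simp only
        nlinarith
      have hw1 : ∀ wc ∈ pvDecomp c (min l (PySem.Int.floordiv am c)).toNat 1
          (min l (PySem.Int.floordiv am c)), 1 ≤ wc.1 := by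
        intro wc hwc
        rw [pvDecomp_eq_parts] at hwc
        rcases List.mem_map.mp hwc with ⟨p, hp, rfl⟩
        have := pvParts_pos _ 1 _ le_rfl p hp
        simp only
        nlinarith
      rw [if_neg (by omega)]
      constructor
      · rw [pvSeq_eq am ham _ hw1 d hinv, hA]
        funext x
        by_cases hx : x ≤ am
        · rw [if_pos hx, if_pos hx]
          exact (pvGroup_cmin am c l hc1 hl1 ham d hinv x hx).symm
        · rw [if_neg hx, if_neg hx]
      · rw [hA]
        exact pvInv_cmin am ham d hinv _ hcand1

theorem pvChain (am : Int) (ham : 0 ≤ am) :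
    ∀ (pairs : List (Int × Int)), (∀ cl ∈ pairs, 0 ≤ cl.1) →
    ∀ d : Int → Option Int, pvInv am d →
      pairs.foldl (fun dp cl => pvGpass am cl.1 cl.2 1 dp) d
        = pairs.foldl (fun dp cl =>
            (if cl.1 ≤ 0 ∨ cl.2 ≤ 0 then ([] : List (Int × Int)) else
              pvDecomp cl.1 (min cl.2 (PySem.Int.floordiv am cl.1)).toNat 1
                (min cl.2 (PySem.Int.floordiv am cl.1))).foldl
              (fun dp wc => pvGpass am wc.1 1 wc.2 dp) dp) d := by
  intro pairs
  induction pairs with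
  | nil => intro _ d _; rfl
  | cons p ps ih =>
    intro hmem d hinv
    have hp := pvPairEq am p.1 p.2 ham (hmem p List.mem_cons_self) d hinv
    rw [List.foldl_cons, List.foldl_cons, ← hp.1]
    exact ih (fun cl hcl => hmem cl (List.mem_cons_of_mem p hcl)) _ hp.2

-- ---- bridge: list-state dp (the ports) vs function-state dp (the proof model) ----
def pvReadL (dp : List (Option Int)) (x : Int) : Option Int :=
  if 0 ≤ x then dp.getD x.toNat none else none

theorem pvGetL_eq_read (dp : List (Option Int)) (j : Int) (hj : 0 ≤ j) :
    pvGetL dp j = pvReadL dp j := by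
  unfold pvReadL
  rw [if_pos hj]
  rfl

theorem pvSetL_len (dp : List (Option Int)) (i : Int) (v : Option Int) :
    (pvSetL dp i v).length = dp.length := List.length_set

theorem pvReadL_set (dp : List (Option Int)) (i : Int) (v : Option Int) (h0 : 0 ≤ i)
    (h1 : i < (dp.length : Int)) :
    pvReadL (pvSetL dp i v) = pvUpd (pvReadL dp) i v := by
  funext x
  simp only [pvReadL, pvSetL, pvUpd]
  by_cases hx : 0 ≤ x
  · by_cases hxi : x = i
    · subst hxi
      rw [if_pos hx, if_pos rfl, List.getD_eq_getElem?_getD, List.getElem?_set_self (by omega),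
        Option.getD_some]
    · rw [if_pos hx, if_neg hxi, if_pos hx, List.getD_eq_getElem?_getD,
        List.getElem?_set_ne (by omega), ← List.getD_eq_getElem?_getD]
  · rw [if_neg hx, if_neg (by omega), if_neg hx]

theorem pvRead_dp0 (amount : Int) (ham : 0 ≤ amount) :
    pvReadL ((List.replicate (amount + 1).toNat none).set 0 (some (0 : Int)))
      = fun x => if x = 0 then some 0 else none := by
  funext x
  unfold pvReadL
  by_cases hx : 0 ≤ x
  · rw [if_pos hx, List.getD_eq_getElem?_getD]
    by_cases hx0 : x = 0
    · subst hx0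
      rw [show (0 : Int).toNat = 0 from rfl,
        List.getElem?_set_self (by rw [List.length_replicate]; omega), Option.getD_some,
        if_pos rfl]
    · rw [List.getElem?_set_ne (by omega), if_neg hx0, List.getElem?_replicate]
      split <;> rfl
  · rw [if_neg hx, if_neg (by omega)]

theorem pvBridgeInnerA (am c j : Int) (hj : 0 ≤ j) (hc : 0 ≤ c) :
    ∀ ks : List Int, (∀ k ∈ ks, 1 ≤ k) → ∀ dp : List (Option Int), ((dp.length : Int) = am + 1) →
      (((ks.foldl (fun dp k =>
          if j + k * c ≤ am then
            pvSetL dp (j + k * c) (pvVmin (pvGetL dp (j + k * c)) (pvVadd (pvGetL dp j) k))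
          else dp) dp).length : Int) = am + 1)
      ∧ pvReadL (ks.foldl (fun dp k =>
          if j + k * c ≤ am then
            pvSetL dp (j + k * c) (pvVmin (pvGetL dp (j + k * c)) (pvVadd (pvGetL dp j) k))
          else dp) dp)
        = ks.foldl (fun d k =>
            if j + k * c ≤ am then
              pvUpd d (j + k * c) (pvVmin (d (j + k * c)) (pvVadd (d j) k))
            else d) (pvReadL dp) := by
  intro ks
  induction ks with
  | nil => intro _ dp hlen; exact ⟨hlen, rfl⟩
  | cons a ks ih =>
    intro hmem dp hlen
    have ha : 1 ≤ a := hmem a List.mem_cons_self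
    have ht0 : 0 ≤ j + a * c := by nlinarith
    rw [List.foldl_cons, List.foldl_cons]
    by_cases hg : j + a * c ≤ am
    · rw [if_pos hg, if_pos hg]
      have hstep : pvReadL (pvSetL dp (j + a * c)
            (pvVmin (pvGetL dp (j + a * c)) (pvVadd (pvGetL dp j) a)))
          = pvUpd (pvReadL dp) (j + a * c)
              (pvVmin (pvReadL dp (j + a * c)) (pvVadd (pvReadL dp j) a)) := by
        rw [pvGetL_eq_read dp _ ht0, pvGetL_eq_read dp j hj]
        exact pvReadL_set dp (j + a * c)
          (pvVmin (pvReadL dp (j + a * c)) (pvVadd (pvReadL dp j) a)) ht0 (by omega)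
      obtain ⟨l1, e1⟩ := ih (fun k hk => hmem k (List.mem_cons_of_mem a hk))
        (pvSetL dp (j + a * c) (pvVmin (pvGetL dp (j + a * c)) (pvVadd (pvGetL dp j) a)))
        (by rw [pvSetL_len]; exact hlen)
      exact ⟨l1, by rw [e1, hstep]⟩
    · rw [if_neg hg, if_neg hg]
      exact ih (fun k hk => hmem k (List.mem_cons_of_mem a hk)) dp hlen

theorem pvBridgeCoinA (am c l : Int) (hc : 0 ≤ c) :
    ∀ js : List Int, (∀ j ∈ js, 0 ≤ j) → ∀ dp : List (Option Int), ((dp.length : Int) = am + 1) →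
      (((js.foldl (fun dp j =>
          match pvGetL dp j with
          | none => dp
          | some _ =>
            (PySem.List.pyRange 1 (l + 1) 1).foldl (fun dp k =>
              if j + k * c ≤ am then
                pvSetL dp (j + k * c) (pvVmin (pvGetL dp (j + k * c)) (pvVadd (pvGetL dp j) k))
              else dp) dp) dp).length : Int) = am + 1)
      ∧ pvReadL (js.foldl (fun dp j =>
          match pvGetL dp j with
          | none => dp
          | some _ =>
            (PySem.List.pyRange 1 (l + 1) 1).foldl (fun dp k =>
              if j + k * c ≤ am then
                pvSetL dp (j + k * c) (pvVmin (pvGetL dp (j + k * c)) (pvVadd (pvGetL dp j) k))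
              else dp) dp) dp)
        = js.foldl (fun d j =>
            match d j with
            | none => d
            | some _ =>
              (PySem.List.pyRange 1 (l + 1) 1).foldl (fun d k =>
                if j + k * c ≤ am then
                  pvUpd d (j + k * c) (pvVmin (d (j + k * c)) (pvVadd (d j) k))
                else d) d) (pvReadL dp) := by
  intro js
  induction js with
  | nil => intro _ dp hlen; exact ⟨hlen, rfl⟩
  | cons j js ih =>
    intro hmem dp hlen
    have hj : 0 ≤ j := hmem j List.mem_cons_self
    rw [List.foldl_cons, List.foldl_cons]
    have hread : pvGetL dp j = pvReadL dp j := pvGetL_eq_read dp j hj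
    cases h : pvGetL dp j with
    | none =>
      have hr : pvReadL dp j = none := by rw [← hread, h]
      rw [hr]
      exact ih (fun x hx => hmem x (List.mem_cons_of_mem j hx)) dp hlen
    | some v =>
      have hr : pvReadL dp j = some v := by rw [← hread, h]
      rw [hr]
      obtain ⟨l1, e1⟩ := pvBridgeInnerA am c j hj hc (PySem.List.pyRange 1 (l + 1) 1)
        (fun k hk => ((PySem.List.mem_pyRange_one).mp hk).1) dp hlen
      obtain ⟨l2, e2⟩ := ih (fun x hx => hmem x (List.mem_cons_of_mem j hx)) _ l1
      exact ⟨l2, by rw [e2, e1]⟩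

theorem pvBridgeA (am : Int) (coins limits : List Int) (hcd : ∀ i : Nat, 0 ≤ coins.getD i 0) :
    ∀ is : List Nat, ∀ dp : List (Option Int), ((dp.length : Int) = am + 1) →
      pvReadL (is.foldl (fun dp i =>
        (PySem.List.pyRange am (-1) (-1)).foldl (fun dp j =>
          match pvGetL dp j with
          | none => dp
          | some _ =>
            (PySem.List.pyRange 1 (limits.getD i 0 + 1) 1).foldl (fun dp k =>
              if j + k * coins.getD i 0 ≤ am then
                pvSetL dp (j + k * coins.getD i 0)
                  (pvVmin (pvGetL dp (j + k * coins.getD i 0)) (pvVadd (pvGetL dp j) k))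
              else dp) dp) dp) dp)
      = is.foldl (fun d i =>
          (PySem.List.pyRange am (-1) (-1)).foldl (fun d j =>
            match d j with
            | none => d
            | some _ =>
              (PySem.List.pyRange 1 (limits.getD i 0 + 1) 1).foldl (fun d k =>
                if j + k * coins.getD i 0 ≤ am then
                  pvUpd d (j + k * coins.getD i 0)
                    (pvVmin (d (j + k * coins.getD i 0)) (pvVadd (d j) k))
                else d) d) d) (pvReadL dp) := by
  intro is
  induction is with
  | nil => intro dp _; rfl
  | cons i is ih =>
    intro dp hlen
    rw [List.foldl_cons, List.foldl_cons]
    obtain ⟨l1, e1⟩ := pvBridgeCoinA am (coins.getD i 0) (limits.getD i 0) (hcd i)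
      (PySem.List.pyRange am (-1) (-1))
      (fun j hj => by have := (PySem.List.mem_pyRange_neg_one.mp hj).1; omega) dp hlen
    rw [← e1]
    exact ih _ l1

theorem pvBridgeInnerB (am w γ : Int) (hw : 1 ≤ w) :
    ∀ js : List Int, (∀ j ∈ js, 0 ≤ j) → ∀ dp : List (Option Int), ((dp.length : Int) = am + 1) →
      (((js.foldl (fun dp j =>
          if j + w ≤ am then
            pvSetL dp (j + w) (pvVmin (pvGetL dp (j + w)) (pvVadd (pvGetL dp j) γ))
          else dp) dp).length : Int) = am + 1)
      ∧ pvReadL (js.foldl (fun dp j =>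
          if j + w ≤ am then
            pvSetL dp (j + w) (pvVmin (pvGetL dp (j + w)) (pvVadd (pvGetL dp j) γ))
          else dp) dp)
        = js.foldl (fun d j =>
            if j + w ≤ am then pvUpd d (j + w) (pvVmin (d (j + w)) (pvVadd (d j) γ)) else d)
          (pvReadL dp) := by
  intro js
  induction js with
  | nil => intro _ dp hlen; exact ⟨hlen, rfl⟩
  | cons j js ih =>
    intro hmem dp hlen
    have hj : 0 ≤ j := hmem j List.mem_cons_self
    have ht0 : 0 ≤ j + w := by omega
    rw [List.foldl_cons, List.foldl_cons]
    by_cases hg : j + w ≤ am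
    · rw [if_pos hg, if_pos hg]
      have hstep : pvReadL (pvSetL dp (j + w) (pvVmin (pvGetL dp (j + w)) (pvVadd (pvGetL dp j) γ)))
          = pvUpd (pvReadL dp) (j + w) (pvVmin (pvReadL dp (j + w)) (pvVadd (pvReadL dp j) γ)) := by
        rw [pvGetL_eq_read dp _ ht0, pvGetL_eq_read dp j hj]
        exact pvReadL_set dp (j + w)
          (pvVmin (pvReadL dp (j + w)) (pvVadd (pvReadL dp j) γ)) ht0 (by omega)
      obtain ⟨l1, e1⟩ := ih (fun x hx => hmem x (List.mem_cons_of_mem j hx))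
        (pvSetL dp (j + w) (pvVmin (pvGetL dp (j + w)) (pvVadd (pvGetL dp j) γ)))
        (by rw [pvSetL_len]; exact hlen)
      exact ⟨l1, by rw [e1, hstep]⟩
    · rw [if_neg hg, if_neg hg]
      exact ih (fun x hx => hmem x (List.mem_cons_of_mem j hx)) dp hlen

theorem pvBridgeB (am : Int) :
    ∀ items : List (Int × Int), (∀ wc ∈ items, 1 ≤ wc.1) →
    ∀ dp : List (Option Int), ((dp.length : Int) = am + 1) →
      pvReadL (items.foldl (fun dp wc =>
        (PySem.List.pyRange am (-1) (-1)).foldl (fun dp j =>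
          if j + wc.1 ≤ am then
            pvSetL dp (j + wc.1) (pvVmin (pvGetL dp (j + wc.1)) (pvVadd (pvGetL dp j) wc.2))
          else dp) dp) dp)
      = items.foldl (fun d wc =>
          (PySem.List.pyRange am (-1) (-1)).foldl (fun d j =>
            if j + wc.1 ≤ am then
              pvUpd d (j + wc.1) (pvVmin (d (j + wc.1)) (pvVadd (d j) wc.2))
            else d) d) (pvReadL dp) := by
  intro items
  induction items with
  | nil => intro _ dp _; rfl
  | cons wc items ih =>
    intro hmem dp hlen
    rw [List.foldl_cons, List.foldl_cons]
    obtain ⟨l1, e1⟩ := pvBridgeInnerB am wc.1 wc.2 (hmem wc List.mem_cons_self)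
      (PySem.List.pyRange am (-1) (-1))
      (fun j hj => by have := (PySem.List.mem_pyRange_neg_one.mp hj).1; omega) dp hlen
    rw [← e1]
    exact ih (fun x hx => hmem x (List.mem_cons_of_mem wc hx)) _ l1

theorem pvItemsWeights (amount : Int) (pairs : List (Int × Int)) :
    ∀ wc ∈ pairs.foldl (fun acc cl =>
      if cl.1 ≤ 0 ∨ cl.2 ≤ 0 then acc
      else acc ++ pvDecomp cl.1 (min cl.2 (PySem.Int.floordiv amount cl.1)).toNat 1
        (min cl.2 (PySem.Int.floordiv amount cl.1))) [], 1 ≤ wc.1 := by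
  rw [pvItems_eq amount pairs [], List.nil_append]
  intro wc hwc
  rcases List.mem_flatMap.mp hwc with ⟨cl, hcl, hwc2⟩
  by_cases hg : cl.1 ≤ 0 ∨ cl.2 ≤ 0
  · rw [if_pos hg] at hwc2
    cases hwc2
  · rw [if_neg hg, pvDecomp_eq_parts] at hwc2
    rcases List.mem_map.mp hwc2 with ⟨p, hp, rfl⟩
    have hp1 := pvParts_pos _ 1 _ le_rfl p hp
    have hc1 : 1 ≤ cl.1 := by omega
    simp only
    nlinarith

-- the whole equivalence at the level of the function model
theorem pvKeyFun (coins limits : List Int) (amount : Int) (ham : 0 ≤ amount)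
    (hlen : coins.length ≤ limits.length) (hcoins : ∀ c ∈ coins, 0 ≤ c) :
    (List.range coins.length).foldl (fun dp i =>
      (PySem.List.pyRange amount (-1) (-1)).foldl (fun dp j =>
        match dp j with
        | none => dp
        | some _ =>
          (PySem.List.pyRange 1 (limits.getD i 0 + 1) 1).foldl (fun dp k =>
            if j + k * coins.getD i 0 ≤ amount then
              pvUpd dp (j + k * coins.getD i 0)
                (pvVmin (dp (j + k * coins.getD i 0)) (pvVadd (dp j) k))
            else dp) dp) dp) (fun x => if x = 0 then some 0 else none)
    = ((coins.zip limits).foldl (fun acc cl =>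
        if cl.1 ≤ 0 ∨ cl.2 ≤ 0 then acc
        else acc ++ pvDecomp cl.1 (min cl.2 (PySem.Int.floordiv amount cl.1)).toNat 1
          (min cl.2 (PySem.Int.floordiv amount cl.1))) []).foldl (fun dp wc =>
        (PySem.List.pyRange amount (-1) (-1)).foldl (fun dp j =>
          if j + wc.1 ≤ amount then
            pvUpd dp (j + wc.1) (pvVmin (dp (j + wc.1)) (pvVadd (dp j) wc.2))
          else dp) dp) (fun x => if x = 0 then some 0 else none) := by
  have hinv0 : pvInv amount (fun x => if x = 0 then some 0 else none) := by
    intro x hx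
    have hx0 : x ≠ 0 := by omega
    simp [hx0]
  have hA : ∀ d0 : Int → Option Int, (List.range coins.length).foldl (fun dp i =>
      (PySem.List.pyRange amount (-1) (-1)).foldl (fun dp j =>
        match dp j with
        | none => dp
        | some _ =>
          (PySem.List.pyRange 1 (limits.getD i 0 + 1) 1).foldl (fun dp k =>
            if j + k * coins.getD i 0 ≤ amount then
              pvUpd dp (j + k * coins.getD i 0)
                (pvVmin (dp (j + k * coins.getD i 0)) (pvVadd (dp j) k))
            else dp) dp) dp) d0
      = (coins.zip limits).foldl (fun dp cl => pvGpass amount cl.1 cl.2 1 dp) d0 := by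
    intro d0
    rw [← pvZip_eq coins limits hlen, List.foldl_map]
    refine pvFoldl_ext _ _ (fun dp i => ?_) _ _
    exact pvApass_eq_gpass amount (coins.getD i 0) (limits.getD i 0) dp
  rw [hA]
  rw [pvItems_eq amount (coins.zip limits) [], List.nil_append]
  have hB : ∀ (items : List (Int × Int)) (d0 : Int → Option Int),
      items.foldl (fun dp wc =>
        (PySem.List.pyRange amount (-1) (-1)).foldl (fun dp j =>
          if j + wc.1 ≤ amount then
            pvUpd dp (j + wc.1) (pvVmin (dp (j + wc.1)) (pvVadd (dp j) wc.2))
          else dp) dp) d0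
      = items.foldl (fun dp wc => pvGpass amount wc.1 1 wc.2 dp) d0 := by
    intro items d0
    refine pvFoldl_ext _ _ (fun dp wc => ?_) _ _
    exact pvBpass_eq_gpass amount wc.1 wc.2 dp
  rw [hB, pvFoldl_flatMap]
  have hmem : ∀ cl ∈ coins.zip limits, 0 ≤ cl.1 := by
    intro cl hcl
    rcases cl with ⟨c, l⟩
    exact hcoins c (List.of_mem_zip hcl).1
  exact pvChain amount ham (coins.zip limits) hmem _ hinv0

-- ===== VERDICT (by name: the statement is the Claim_ definition above) =====
theorem coin_change_with_limits_spec : Claim_equal_coin_change_with_limits := by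
  intro coins limits amount _ hpre
  obtain ⟨ham, hlen, hcoins⟩ := hpre
  unfold Spec_coin_change_with_limits
  have hcd : ∀ i : Nat, 0 ≤ coins.getD i 0 := by
    intro i
    by_cases h : i < coins.length
    · rw [List.getD_eq_getElem coins 0 h]
      exact hcoins _ (List.getElem_mem h)
    · rw [List.getD_eq_getElem?_getD, List.getElem?_eq_none (by omega), Option.getD_none]
  have hlen0 : ((((List.replicate (amount + 1).toNat (none : Option Int)).set 0
      (some (0 : Int))).length : Int)) = amount + 1 := by
    simp
    omega
  have hAr := pvBridgeA amount coins limits hcd (List.range coins.length) _ hlen0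
  have hBr := pvBridgeB amount
    ((coins.zip limits).foldl (fun (acc : List (Int × Int)) (cl : Int × Int) =>
      if cl.1 ≤ 0 ∨ cl.2 ≤ 0 then acc
      else acc ++ pvDecomp cl.1 (min cl.2 (PySem.Int.floordiv amount cl.1)).toNat 1
        (min cl.2 (PySem.Int.floordiv amount cl.1))) [])
    (pvItemsWeights amount (coins.zip limits)) _ hlen0
  have hkey := pvKeyFun coins limits amount ham hlen hcoins
  rw [pvRead_dp0 amount ham] at hAr hBr
  show (match pvGetL ((List.range coins.length).foldl (fun dp i =>
      (PySem.List.pyRange amount (-1) (-1)).foldl (fun dp j =>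
        match pvGetL dp j with
        | none => dp
        | some _ =>
          (PySem.List.pyRange 1 (limits.getD i 0 + 1) 1).foldl (fun dp k =>
            if j + k * coins.getD i 0 ≤ amount then
              pvSetL dp (j + k * coins.getD i 0)
                (pvVmin (pvGetL dp (j + k * coins.getD i 0)) (pvVadd (pvGetL dp j) k))
            else dp) dp) dp) ((List.replicate (amount + 1).toNat none).set 0 (some (0 : Int))))
      amount with
    | none => (-1 : Int)
    | some v => v)
    = (match pvGetL (((coins.zip limits).foldl (fun acc cl =>
        if cl.1 ≤ 0 ∨ cl.2 ≤ 0 then acc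
        else acc ++ pvDecomp cl.1 (min cl.2 (PySem.Int.floordiv amount cl.1)).toNat 1
          (min cl.2 (PySem.Int.floordiv amount cl.1))) []).foldl (fun dp wc =>
        (PySem.List.pyRange amount (-1) (-1)).foldl (fun dp j =>
          if j + wc.1 ≤ amount then
            pvSetL dp (j + wc.1) (pvVmin (pvGetL dp (j + wc.1)) (pvVadd (pvGetL dp j) wc.2))
          else dp) dp) ((List.replicate (amount + 1).toNat none).set 0 (some (0 : Int))))
      amount with
    | none => (-1 : Int)
    | some v => v)
  have h1 := congrFun (hAr.trans (hkey.trans hBr.symm)) amount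
  have h2 := (pvGetL_eq_read _ amount ham).trans (h1.trans (pvGetL_eq_read _ amount ham).symm)
  exact congrArg (fun o : Option Int => match o with | none => (-1 : Int) | some v => v) h2
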